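-- pv_equiv track=rewrite | github.com/SourishM15/USACO-Bronze-Problem-2-Java-Solution- | main.py | can_create_stamp_painting
-- ===== SOURCE A (Python) =====
-- def rotate_clockwise(matrix):
--   return list(zip(*reversed(matrix)))
--
-- def can_create_stamp_painting(N, desired_painting, K, stamp):
--   for _ in range(4):
--       for i in range(N - K + 1):
--           for j in range(N - K + 1):
--               match = True
--               for x in range(K):
--                   for y in range(K):
--                       if stamp[x][y] == '*' and desired_painting[i + x][j + y] != '*':
--                           match = False
--                           break
--               if match:
--                   return "YES"
--       stamp = rotate_clockwise(stamp)
--   return "NO"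
-- ===== SOURCE B (Python) =====
-- def can_create_stamp_painting(N, desired_painting, K, stamp):
--     if K > N:
--         return "NO"
--     P = N - K + 1
--     stars = [(x, y) for x in range(K) for y in range(K) if stamp[x][y] == '*']
--     if not stars:
--         return "YES"
--     non_stars = [(r, c) for r in range(N) for c in range(N)
--                  if desired_painting[r][c] != '*']
--     for _ in range(4):
--         forbidden = {(r - x, c - y)
--                      for r, c in non_stars for x, y in stars
--                      if 0 <= r - x < P and 0 <= c - y < P}
--         if len(forbidden) < P * P:
--             return "YES"
--         stars = [(y, K - 1 - x) for x, y in stars]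
--     return "NO"
-- ===== Notes on version B (the rewrite author's own statement) =====
-- stated objective: alternative
-- what changed: B inverts the search: instead of testing every placement against every stamp cell (with matrix rotations), it enumerates the grid's non-star cells once and, per rotation, builds the set of FORBIDDEN placements (those whose translated stamp star would cover a non-star cell), answering YES iff the forbidden set is smaller than the number of placements (a sieve-and-count instead of a per-placement check).
-- outside the precondition, e.g. on can_create_stamp_painting(2, [['*', '.'], ['.', '.']], 1, [['*'], ['*', '*']]): A returns 'YES', B returns 'YES'
import Mathlib
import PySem

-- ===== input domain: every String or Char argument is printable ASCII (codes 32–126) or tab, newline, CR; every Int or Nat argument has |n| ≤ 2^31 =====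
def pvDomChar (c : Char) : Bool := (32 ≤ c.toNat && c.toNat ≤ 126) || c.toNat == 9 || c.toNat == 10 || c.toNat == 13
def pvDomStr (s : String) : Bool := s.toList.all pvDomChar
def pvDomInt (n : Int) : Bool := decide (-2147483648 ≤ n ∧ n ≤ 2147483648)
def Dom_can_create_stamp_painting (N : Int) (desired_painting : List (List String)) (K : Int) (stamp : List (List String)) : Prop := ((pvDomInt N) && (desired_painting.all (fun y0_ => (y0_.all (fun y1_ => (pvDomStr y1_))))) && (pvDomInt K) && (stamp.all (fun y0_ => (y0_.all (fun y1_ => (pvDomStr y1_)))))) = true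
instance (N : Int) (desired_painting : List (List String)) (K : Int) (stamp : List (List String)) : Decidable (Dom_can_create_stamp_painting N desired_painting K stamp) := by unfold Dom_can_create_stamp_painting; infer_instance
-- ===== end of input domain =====

-- B inverts the search: it enumerates the grid's non-star cells once and, per rotation,
-- builds the set of FORBIDDEN placements (those whose translated stamp star would cover a
-- non-star cell), answering YES iff that set is smaller than the number of placements
-- (objective: alternative — a sieve-and-count instead of A's per-placement scan).

-- ===== PORT A =====

-- m[a][b], total form via pyGetD defaults; exact where Pre_ guarantees the indices in range
def pvCell (m : List (List String)) (a b : Int) : String :=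
  PySem.List.pyGetD (PySem.List.pyGetD m a []) b ""

-- rotate_clockwise = list(zip(*reversed(matrix))): the builtin zip(*·) is ported by its
-- contract — the truncating transpose (output length = min row length) — of the reversed rows
def pvRotateCW (m : List (List String)) : List (List String) :=
  let r := m.reverse
  (List.range (((r.map List.length).min?).getD 0)).map
    (fun j => r.map (fun row => row.getD j ""))

-- 'for v in range(lo, hi): if f(v): <early exit True>' — A's i/j loops have this shape;
-- ported as bounded recursion so evaluation stops at the first hit, like the loop
def pvForAny (lo hi : Int) (f : Int → Bool) : Bool :=
  if h : lo < hi then (if f lo then true else pvForAny (lo + 1) hi f) else false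
termination_by (hi - lo).toNat
decreasing_by omega

-- the inner x/y loops: match starts True, any violating (x,y) (break) sets it False
def pvMatch (dp st : List (List String)) (K i j : Int) : Bool :=
  (PySem.List.pyRange 0 K 1).foldl (fun m x =>
    if (PySem.List.pyRange 0 K 1).any (fun y =>
        pvCell st x y == "*" && pvCell dp (i + x) (j + y) != "*") then false else m) true

-- the i/j loops with early return "YES"
def pvSearchA (N : Int) (dp : List (List String)) (K : Int) (st : List (List String)) : Bool :=
  pvForAny 0 (N - K + 1) (fun i =>
    pvForAny 0 (N - K + 1) (fun j => pvMatch dp st K i j))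

-- for _ in range(4): search, else rotate the stamp matrix
def pvLoopA (N : Int) (dp : List (List String)) (K : Int) : Nat → List (List String) → String
  | 0, _ => "NO"
  | t + 1, st => if pvSearchA N dp K st then "YES" else pvLoopA N dp K t (pvRotateCW st)

def can_create_stamp_painting (N : Int) (desired_painting : List (List String)) (K : Int) (stamp : List (List String)) : String :=
  pvLoopA N desired_painting K 4 stamp

-- ===== PORT B =====

-- [(x, y) for x in range(K) for y in range(K) if stamp[x][y] == '*']
def pvStampStars (K : Int) (stamp : List (List String)) : List (Int × Int) :=
  (PySem.List.pyRange 0 K 1).flatMap (fun x =>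
    (PySem.List.pyRange 0 K 1).filterMap (fun y =>
      if pvCell stamp x y = "*" then some (x, y) else none))

-- [(r, c) for r in range(N) for c in range(N) if desired_painting[r][c] != '*']
def pvNonStars (N : Int) (dp : List (List String)) : List (Int × Int) :=
  (PySem.List.pyRange 0 N 1).flatMap (fun r =>
    (PySem.List.pyRange 0 N 1).filterMap (fun c =>
      if pvCell dp r c ≠ "*" then some (r, c) else none))

-- {(r - x, c - y) for r, c in non_stars for x, y in stars if 0 <= r-x < P and 0 <= c-y < P}
def pvForbidden (P : Int) (nonstars stars : List (Int × Int)) : PySem.Set (Int × Int) :=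
  PySem.Set.ofList (nonstars.flatMap (fun rc => stars.filterMap (fun xy =>
    if 0 ≤ rc.1 - xy.1 ∧ rc.1 - xy.1 < P ∧ 0 ≤ rc.2 - xy.2 ∧ rc.2 - xy.2 < P
    then some (rc.1 - xy.1, rc.2 - xy.2) else none)))

-- for _ in range(4): count the forbidden placements, else rotate the star coordinates
def pvLoopB (P : Int) (nonstars : List (Int × Int)) (K : Int) :
    Nat → List (Int × Int) → String
  | 0, _ => "NO"
  | t + 1, stars =>
      if ((PySem.Set.len (pvForbidden P nonstars stars) : Int) < P * P) then "YES"
      else pvLoopB P nonstars K t (stars.map (fun p => (p.2, K - 1 - p.1)))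

def can_create_stamp_painting_alt (N : Int) (desired_painting : List (List String)) (K : Int) (stamp : List (List String)) : String :=
  if K > N then "NO"
  else
    let stars := pvStampStars K stamp
    if stars = [] then "YES"
    else pvLoopB (N - K + 1) (pvNonStars N desired_painting) K 4 stars

-- ===== PRECONDITION & SPEC =====
-- Pre_ admits the trivially decided inputs (K > N; K ≤ 0 ≤ N - K) and the well-shaped ones
-- (N×N grid, K×K stamp).  It excludes ill-shaped grids/stamps: there A usually raises
-- IndexError, and where A happens to return its value depends on cells outside the declared
-- N×N / K×K shape (an accident of scan order and zip truncation).
def Pre_can_create_stamp_painting (N : Int) (desired_painting : List (List String)) (K : Int) (stamp : List (List String)) : Prop :=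
  N < K ∨ (K ≤ 0 ∧ K ≤ N) ∨
    ((desired_painting.length : Int) = N ∧ (∀ r ∈ desired_painting, (r.length : Int) = N) ∧
     (stamp.length : Int) = K ∧ (∀ r ∈ stamp, (r.length : Int) = K))

instance (N : Int) (desired_painting : List (List String)) (K : Int) (stamp : List (List String)) : Decidable (Pre_can_create_stamp_painting N desired_painting K stamp) := by
  unfold Pre_can_create_stamp_painting; infer_instance

def pvWitness_can_create_stamp_painting : Int × List (List String) × Int × List (List String) :=
  (2, [["*", "."], [".", "*"]], 1, [["*"]])

def Spec_can_create_stamp_painting (N : Int) (desired_painting : List (List String)) (K : Int) (stamp : List (List String)) (out : String) : Prop := out = can_create_stamp_painting_alt N desired_painting K stamp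
instance (N : Int) (desired_painting : List (List String)) (K : Int) (stamp : List (List String)) (out : String) : Decidable (Spec_can_create_stamp_painting N desired_painting K stamp out) := by unfold Spec_can_create_stamp_painting; infer_instance

-- ===== CLAIM (what is proved, stated in full; the proofs are below) =====
def Claim_equal_can_create_stamp_painting : Prop := ∀ (N : Int) (desired_painting : List (List String)) (K : Int) (stamp : List (List String)), Dom_can_create_stamp_painting N desired_painting K stamp → Pre_can_create_stamp_painting N desired_painting K stamp → Spec_can_create_stamp_painting N desired_painting K stamp (can_create_stamp_painting N desired_painting K stamp)

-- ===== LEMMAS AND PROOFS =====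

-- the early-exit range loop is 'any' over the range
theorem pvForAny_eq_any (hi : Int) (f : Int → Bool) (lo : Int) :
    pvForAny lo hi f = (PySem.List.pyRange lo hi 1).any f := by
  rw [pvForAny]
  split
  · rename_i h
    rw [PySem.List.pyRange_one_cons h, List.any_cons]
    rw [← pvForAny_eq_any hi f (lo + 1)]
    cases hf : f lo <;> simp_all
  · rename_i h
    rw [PySem.List.pyRange_one_eq_nil (by omega)]
    simp
termination_by (hi - lo).toNat
decreasing_by omega

-- the stamp-star list of B, characterised by membership (no shape hypothesis needed)
theorem mem_pvStampStars (K : Int) (st : List (List String)) (p : Int × Int) :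
    p ∈ pvStampStars K st ↔
      0 ≤ p.1 ∧ p.1 < K ∧ 0 ≤ p.2 ∧ p.2 < K ∧ pvCell st p.1 p.2 = "*" := by
  obtain ⟨a, b⟩ := p
  simp only [pvStampStars, List.mem_flatMap, List.mem_filterMap, PySem.List.mem_pyRange_one]
  constructor
  · rintro ⟨x, hx, y, hy, h⟩
    split at h
    · simp_all [Prod.ext_iff]
    · simp at h
  · rintro ⟨h1, h2, h3, h4, h5⟩
    exact ⟨a, ⟨h1, h2⟩, b, ⟨h3, h4⟩, by simp [h5]⟩

-- the non-star list of B, characterised by membership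
theorem mem_pvNonStars (N : Int) (dp : List (List String)) (p : Int × Int) :
    p ∈ pvNonStars N dp ↔
      0 ≤ p.1 ∧ p.1 < N ∧ 0 ≤ p.2 ∧ p.2 < N ∧ pvCell dp p.1 p.2 ≠ "*" := by
  obtain ⟨a, b⟩ := p
  simp only [pvNonStars, List.mem_flatMap, List.mem_filterMap, PySem.List.mem_pyRange_one]
  constructor
  · rintro ⟨x, hx, y, hy, h⟩
    split at h
    · simp_all [Prod.ext_iff]
    · simp at h
  · rintro ⟨h1, h2, h3, h4, h5⟩
    exact ⟨a, ⟨h1, h2⟩, b, ⟨h3, h4⟩, by simp [h5]⟩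

-- membership in the forbidden-placement set
theorem mem_pvForbidden (P : Int) (nonstars stars : List (Int × Int)) (q : Int × Int) :
    q ∈ pvForbidden P nonstars stars ↔
      ∃ rc ∈ nonstars, ∃ xy ∈ stars,
        (0 ≤ rc.1 - xy.1 ∧ rc.1 - xy.1 < P ∧ 0 ≤ rc.2 - xy.2 ∧ rc.2 - xy.2 < P) ∧
        q = (rc.1 - xy.1, rc.2 - xy.2) := by
  simp only [pvForbidden, PySem.Set.mem_ofList, List.mem_flatMap, List.mem_filterMap]
  constructor
  · rintro ⟨rc, hrc, xy, hxy, h⟩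
    split at h
    · rename_i hc
      exact ⟨rc, hrc, xy, hxy, hc, by simp_all⟩
    · simp at h
  · rintro ⟨rc, hrc, xy, hxy, hc, rfl⟩
    exact ⟨rc, hrc, xy, hxy, by rw [if_pos hc]⟩

-- a placement (i,j) inside the window is forbidden iff some star lands on a non-star cell
theorem forbidden_iff (N : Int) (dp : List (List String)) (K P : Int)
    (hP : P = N - K + 1)
    (stars : List (Int × Int))
    (hstK : ∀ p : Int × Int, p ∈ stars → 0 ≤ p.1 ∧ p.1 < K ∧ 0 ≤ p.2 ∧ p.2 < K)
    (i j : Int) (hi0 : 0 ≤ i) (hiP : i < P) (hj0 : 0 ≤ j) (hjP : j < P) :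
    ((i, j) ∈ pvForbidden P (pvNonStars N dp) stars ↔
      ∃ xy ∈ stars, pvCell dp (i + xy.1) (j + xy.2) ≠ "*") := by
  rw [mem_pvForbidden]
  constructor
  · rintro ⟨rc, hrc, xy, hxy, _, hq⟩
    rw [mem_pvNonStars] at hrc
    obtain ⟨h1, h2, h3, h4, h5⟩ := hrc
    have e1 : i = rc.1 - xy.1 := by simpa using congrArg Prod.fst hq
    have e2 : j = rc.2 - xy.2 := by simpa using congrArg Prod.snd hq
    refine ⟨xy, hxy, ?_⟩
    have : i + xy.1 = rc.1 := by omega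
    have : j + xy.2 = rc.2 := by omega
    simp_all
  · rintro ⟨xy, hxy, hns⟩
    obtain ⟨hx0, hxK, hy0, hyK⟩ := hstK xy hxy
    refine ⟨(i + xy.1, j + xy.2), ?_, xy, hxy, ?_, ?_⟩
    · rw [mem_pvNonStars]
      exact ⟨by omega, by omega, by omega, by omega, hns⟩
    · constructor <;> [omega; constructor <;> [omega; constructor <;> [omega; omega]]]
    · simp only [Prod.mk.injEq]; omega

-- A's inner x/y scan, characterised through the star coordinates
theorem pvMatch_true_iff (dp st : List (List String)) (K : Int)
    (stars : List (Int × Int))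
    (hstars : ∀ p : Int × Int, p ∈ stars ↔
      0 ≤ p.1 ∧ p.1 < K ∧ 0 ≤ p.2 ∧ p.2 < K ∧ pvCell st p.1 p.2 = "*")
    (i j : Int) :
    (pvMatch dp st K i j = true ↔
      ∀ p ∈ stars, pvCell dp (i + p.1) (j + p.2) = "*") := by
  rw [pvMatch, PySem.List.foldl_if_false_eq]
  simp only [Bool.true_and, Bool.not_eq_eq_eq_not, Bool.not_true, List.any_eq_false,
    PySem.List.mem_pyRange_one]
  constructor
  · intro h p hp
    rw [hstars] at hp
    obtain ⟨h1, h2, h3, h4, h5⟩ := hp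
    by_contra hne
    apply h p.1 ⟨h1, h2⟩
    simp only [List.any_eq_true, PySem.List.mem_pyRange_one, Bool.and_eq_true, beq_iff_eq,
      bne_iff_ne, ne_eq]
    exact ⟨p.2, ⟨h3, h4⟩, h5, hne⟩
  · intro h x hx hc
    simp only [List.any_eq_true, PySem.List.mem_pyRange_one, Bool.and_eq_true, beq_iff_eq,
      bne_iff_ne, ne_eq] at hc
    obtain ⟨y, hy, hstar, hne⟩ := hc
    exact hne (h (x, y) ((hstars (x, y)).mpr ⟨hx.1, hx.2, hy.1, hy.2, hstar⟩))

-- the counting step: fewer forbidden placements than placements iff some placement is free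
theorem len_lt_iff (P : Int) (hP : 0 < P) (nonstars stars : List (Int × Int)) :
    (((PySem.Set.len (pvForbidden P nonstars stars)) : Int) < P * P ↔
      ∃ i, 0 ≤ i ∧ i < P ∧ ∃ j, 0 ≤ j ∧ j < P ∧
        (i, j) ∉ pvForbidden P nonstars stars) := by
  have hnodup : (pvForbidden P nonstars stars).Nodup := PySem.Set.nodup_ofList _
  have hPP : ((P * P).toNat : Int) = P * P := Int.toNat_of_nonneg (by positivity)
  have hPPpos : (0:Int) < P * P := mul_pos hP hP
  have hcardR : (Finset.Icc (0:Int) (P - 1) ×ˢ Finset.Icc (0:Int) (P - 1)).card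
      = (P * P).toNat := by
    rw [Finset.card_product, Int.card_Icc]
    have h1 : (P - 1 + 1 - 0) = P := by ring
    rw [h1, ← Int.toNat_mul (by omega) (by omega)]
  have hsub : (pvForbidden P nonstars stars).toFinset ⊆
      Finset.Icc (0:Int) (P - 1) ×ˢ Finset.Icc (0:Int) (P - 1) := by
    intro q hq
    rw [List.mem_toFinset] at hq
    rw [mem_pvForbidden] at hq
    obtain ⟨rc, _, xy, _, hc, rfl⟩ := hq
    simp only [Finset.mem_product, Finset.mem_Icc]
    omega
  have hlenF : (PySem.Set.len (pvForbidden P nonstars stars))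
      = (pvForbidden P nonstars stars).toFinset.card := by
    rw [List.toFinset_card_of_nodup hnodup]; rfl
  constructor
  · intro hlt
    have hcard : (pvForbidden P nonstars stars).toFinset.card
        < (Finset.Icc (0:Int) (P - 1) ×ˢ Finset.Icc (0:Int) (P - 1)).card := by omega
    obtain ⟨q, hqR, hqF⟩ := Finset.exists_mem_notMem_of_card_lt_card hcard
    simp only [Finset.mem_product, Finset.mem_Icc] at hqR
    refine ⟨q.1, hqR.1.1, by omega, q.2, hqR.2.1, by omega, ?_⟩
    intro hmem
    exact hqF (by rw [List.mem_toFinset]; simpa using hmem)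
  · rintro ⟨i, hi0, hiP, j, hj0, hjP, hfree⟩
    have hqR : (i, j) ∈ Finset.Icc (0:Int) (P - 1) ×ˢ Finset.Icc (0:Int) (P - 1) := by
      simp only [Finset.mem_product, Finset.mem_Icc]; omega
    have hsub' : (pvForbidden P nonstars stars).toFinset ⊆
        (Finset.Icc (0:Int) (P - 1) ×ˢ Finset.Icc (0:Int) (P - 1)).erase (i, j) := by
      intro q hq
      refine Finset.mem_erase.mpr ⟨?_, hsub hq⟩
      rintro rfl
      exact hfree (by rwa [List.mem_toFinset] at hq)
    have hle := Finset.card_le_card hsub'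
    have hcarde := Finset.card_erase_of_mem hqR
    rw [hlenF]
    omega

-- per rotation: A's scan succeeds iff B counts a free placement
theorem search_eq_count (N : Int) (dp : List (List String)) (K P : Int)
    (hP : P = N - K + 1) (hP0 : 0 < P)
    (st : List (List String)) (stars : List (Int × Int))
    (hstars : ∀ p : Int × Int, p ∈ stars ↔
      0 ≤ p.1 ∧ p.1 < K ∧ 0 ≤ p.2 ∧ p.2 < K ∧ pvCell st p.1 p.2 = "*") :
    pvSearchA N dp K st =
      decide (((PySem.Set.len (pvForbidden P (pvNonStars N dp) stars)) : Int) < P * P) := by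
  have hstK : ∀ p : Int × Int, p ∈ stars → 0 ≤ p.1 ∧ p.1 < K ∧ 0 ≤ p.2 ∧ p.2 < K := by
    intro p hp; have := (hstars p).mp hp; tauto
  rw [Bool.eq_iff_iff, pvSearchA, pvForAny_eq_any]
  simp only [List.any_eq_true, PySem.List.mem_pyRange_one, pvForAny_eq_any, decide_eq_true_eq]
  rw [len_lt_iff P hP0]
  constructor
  · rintro ⟨i, hi, j, hj, hm⟩
    refine ⟨i, hi.1, by omega, j, hj.1, by omega, ?_⟩
    intro hmem
    rw [forbidden_iff N dp K P hP stars hstK i j hi.1 (by omega) hj.1 (by omega)] at hmem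
    obtain ⟨xy, hxy, hne⟩ := hmem
    exact hne ((pvMatch_true_iff dp st K stars hstars i j).mp hm xy hxy)
  · rintro ⟨i, hi0, hiP, j, hj0, hjP, hfree⟩
    refine ⟨i, ⟨hi0, by omega⟩, j, ⟨hj0, by omega⟩, ?_⟩
    rw [pvMatch_true_iff dp st K stars hstars i j]
    intro p hp
    by_contra hne
    exact hfree ((forbidden_iff N dp K P hP stars hstK i j hi0 hiP hj0 hjP).mpr ⟨p, hp, hne⟩)

-- the zip(*reversed) truncation length is K on a K×K matrix
theorem pvRotate_min (K : Int) (st : List (List String))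
    (hlen : (st.length : Int) = K) (hrows : ∀ r ∈ st, (r.length : Int) = K) :
    (((List.map List.length st).reverse.min?).getD 0) = K.toNat := by
  rcases st with _ | ⟨r0, rest⟩
  · simp at hlen; simp [← hlen]
  · have hall : ∀ n ∈ (List.map List.length (r0 :: rest)).reverse, n = K.toNat := by
      intro n hn
      simp only [List.mem_reverse, List.mem_map] at hn
      obtain ⟨r, hr, rfl⟩ := hn
      have := hrows r hr; omega
    have hne : (List.map List.length (r0 :: rest)).reverse ≠ [] := by simp
    rcases hmin : ((List.map List.length (r0 :: rest)).reverse).min? with _ | m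
    · exact absurd (List.min?_eq_none_iff.mp hmin) hne
    · have hmem := List.min?_mem hmin
      simp only [Option.getD_some]
      exact hall m hmem

-- rotating the matrix reads as the coordinate map: rot[x][y] = st[K-1-y][x]
theorem pvCell_rotate (K : Int) (st : List (List String))
    (hlen : (st.length : Int) = K) (hrows : ∀ r ∈ st, (r.length : Int) = K)
    (x y : Int) (hx0 : 0 ≤ x) (hxK : x < K) (hy0 : 0 ≤ y) (hyK : y < K) :
    pvCell (pvRotateCW st) x y = pvCell st (K - 1 - y) x := by
  have hmin := pvRotate_min K st hlen hrows
  have hxlt : x.toNat < K.toNat := by omega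
  have hylt : y.toNat < st.length := by omega
  have hlenrot : (pvRotateCW st).length = K.toNat := by
    simp [pvRotateCW, hmin]
  have h1 : PySem.List.pyGetD (pvRotateCW st) x [] =
      st.reverse.map (fun row => row.getD x.toNat "") := by
    rw [PySem.List.pyGetD_eq_getElem _ _ hx0 (by omega)]
    simp only [pvRotateCW]
    simp [hmin]
  have hlen2 : (st.reverse.map (fun row => row.getD x.toNat "")).length = st.length := by simp
  have h2 : PySem.List.pyGetD (st.reverse.map (fun row => row.getD x.toNat "")) y "" =
      (st[(K - 1 - y).toNat]'(by omega)).getD x.toNat "" := by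
    rw [PySem.List.pyGetD_eq_getElem _ _ hy0 (by rw [hlen2]; omega)]
    rw [List.getElem_map, List.getElem_reverse]
    congr 2
    omega
  have hr0 : (0:Int) ≤ K - 1 - y := by omega
  have h3 : PySem.List.pyGetD st (K - 1 - y) [] = st[(K - 1 - y).toNat]'(by omega) := by
    rw [PySem.List.pyGetD_eq_getElem _ _ hr0 (by omega)]
  have h4 : PySem.List.pyGetD (st[(K - 1 - y).toNat]'(by omega)) x "" =
      (st[(K - 1 - y).toNat]'(by omega)).getD x.toNat "" := by
    have hrowlen : ((st[(K - 1 - y).toNat]'(by omega)).length : Int) = K :=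
      hrows _ (List.getElem_mem (by omega))
    rw [PySem.List.pyGetD_eq_getElem _ _ hx0 (by omega)]
    rw [List.getD_eq_getElem _ _ (by omega)]
  rw [pvCell, h1, h2, pvCell, h3, h4]

theorem pvRotateCW_shape (K : Int) (st : List (List String))
    (hlen : (st.length : Int) = K) (hrows : ∀ r ∈ st, (r.length : Int) = K) :
    ((pvRotateCW st).length : Int) = K ∧ ∀ r ∈ pvRotateCW st, (r.length : Int) = K := by
  have hmin := pvRotate_min K st hlen hrows
  constructor
  · simp [pvRotateCW, hmin]; omega
  · intro r hr
    simp only [pvRotateCW, List.mem_map] at hr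
    obtain ⟨j, _, rfl⟩ := hr
    simp [hlen]

-- rotating the star coordinates tracks rotating the matrix
theorem rotate_stars (K : Int) (st : List (List String))
    (hlen : (st.length : Int) = K) (hrows : ∀ r ∈ st, (r.length : Int) = K)
    (stars : List (Int × Int))
    (hstars : ∀ p : Int × Int, p ∈ stars ↔
      0 ≤ p.1 ∧ p.1 < K ∧ 0 ≤ p.2 ∧ p.2 < K ∧ pvCell st p.1 p.2 = "*")
    (p : Int × Int) :
    p ∈ stars.map (fun p => (p.2, K - 1 - p.1)) ↔
      0 ≤ p.1 ∧ p.1 < K ∧ 0 ≤ p.2 ∧ p.2 < K ∧ pvCell (pvRotateCW st) p.1 p.2 = "*" := by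
  obtain ⟨a, b⟩ := p
  simp only [List.mem_map, Prod.mk.injEq]
  constructor
  · rintro ⟨⟨u, v⟩, hq, h1, h2⟩
    rw [hstars] at hq
    obtain ⟨g1, g2, g3, g4, g5⟩ := hq
    simp only at h1 h2
    subst h1; subst h2
    refine ⟨g3, g4, by omega, by omega, ?_⟩
    rw [pvCell_rotate K st hlen hrows v (K - 1 - u) g3 g4 (by omega) (by omega)]
    simpa using g5
  · rintro ⟨h1, h2, h3, h4, h5⟩
    refine ⟨(K - 1 - b, a), ?_, by simp, by simp⟩
    rw [hstars]
    refine ⟨by omega, by omega, h1, h2, ?_⟩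
    rw [pvCell_rotate K st hlen hrows a b h1 h2 h3 h4] at h5
    exact h5

theorem pvLoop_eq (N : Int) (dp : List (List String)) (K P : Int)
    (hP : P = N - K + 1) (hP0 : 0 < P)
    (t : Nat) (st : List (List String)) (stars : List (Int × Int))
    (hlen : (st.length : Int) = K) (hrows : ∀ r ∈ st, (r.length : Int) = K)
    (hstars : ∀ p : Int × Int, p ∈ stars ↔
      0 ≤ p.1 ∧ p.1 < K ∧ 0 ≤ p.2 ∧ p.2 < K ∧ pvCell st p.1 p.2 = "*") :
    pvLoopA N dp K t st = pvLoopB P (pvNonStars N dp) K t stars := by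
  induction t generalizing st stars with
  | zero => simp [pvLoopA, pvLoopB]
  | succ t ih =>
    have hs := search_eq_count N dp K P hP hP0 st stars hstars
    have hshape := pvRotateCW_shape K st hlen hrows
    simp only [pvLoopA, pvLoopB, hs, decide_eq_true_eq]
    split_ifs with h
    · rfl
    · exact ih (pvRotateCW st) _ hshape.1 hshape.2
        (rotate_stars K st hlen hrows stars hstars)

-- ===== VERDICT (by name: the statement is the Claim_ definition above) =====
theorem can_create_stamp_painting_spec : Claim_equal_can_create_stamp_painting := by
  intro N dp K stamp _ hpre
  unfold Spec_can_create_stamp_painting can_create_stamp_painting can_create_stamp_painting_alt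
  by_cases hNK : N < K
  · -- no placement is ever attempted: both sides are "NO"
    have hr : PySem.List.pyRange 0 (N - K + 1) 1 = [] :=
      PySem.List.pyRange_one_eq_nil (by omega)
    simp [pvLoopA, pvSearchA, pvForAny_eq_any, hr, hNK]
  · have hKN : ¬ K > N := by omega
    by_cases hstars : pvStampStars K stamp = []
    · -- no stamp star: the empty star set matches at (0,0) on both sides
      have hr2 : PySem.List.pyRange 0 (N - K + 1) 1 =
          0 :: PySem.List.pyRange 1 (N - K + 1) 1 := by
        simpa using PySem.List.pyRange_one_cons (a := 0) (b := N - K + 1) (by omega)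
      have hm : pvMatch dp stamp K 0 0 = true := by
        rw [pvMatch_true_iff dp stamp K (pvStampStars K stamp)
          (mem_pvStampStars K stamp) 0 0]
        simp [hstars]
      simp [pvLoopA, pvSearchA, pvForAny_eq_any, hr2, hm, hKN, hstars]
    · rcases hpre with h | ⟨hK0, _⟩ | ⟨hdlen, hdrows, hslen, hsrows⟩
      · omega
      · -- K ≤ 0: range(K) is empty, so the star list is empty — contradiction
        exact absurd (by simp [pvStampStars, PySem.List.pyRange_one_eq_nil (by omega : K ≤ 0)])
          hstars
      · simp only [hKN, if_false, hstars, if_false]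
        exact pvLoop_eq N dp K (N - K + 1) rfl (by omega) 4 stamp (pvStampStars K stamp)
          hslen hsrows (mem_pvStampStars K stamp)
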